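-- pv_equiv track=rewrite | github.com/AlienVoices-org/fractal-logic-unit | src/flu/core/lo_shu.py | _balanced_to_bt
-- ===== SOURCE A (Python) =====
-- from typing import Dict, Any, List, Optional, Tuple
--
-- def _balanced_to_bt(balanced: int) -> Tuple[int, int, int, int]:
--     """
--     Encode balanced int in balanced-ternary 4-tuple ∈ {-1,0,1}^4.
--
--     STATUS: DESIGN INTENT — encoding for 3⁴ sparse manifold addressing.
--     """
--     val  = balanced
--     bt   = []
--     for _ in range(4):
--         digit = val % 3
--         if digit == 2:
--             digit = -1
--         bt.append(digit)
--         val = (val - digit) // 3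
--     return tuple(bt)   # type: ignore[return-value]
-- ===== SOURCE B (Python) =====
-- from typing import Dict, Any, List, Optional, Tuple
--
-- def _bt_digits(m: int) -> Tuple[int, int, int, int]:
--     d0 = m % 3 - 1; m //= 3
--     d1 = m % 3 - 1; m //= 3
--     d2 = m % 3 - 1; m //= 3
--     d3 = m % 3 - 1
--     return (d0, d1, d2, d3)
--
-- # lookup table: each residue m of the 3**4 grid -> balanced-ternary tuple of m - 40
-- _BT_TABLE = tuple(_bt_digits(m) for m in range(81))
--
-- def _balanced_to_bt(balanced: int) -> Tuple[int, int, int, int]: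
--     return _BT_TABLE[(balanced + 40) % 81]
-- ===== Notes on version B (the rewrite author's own statement) =====
-- stated objective: simpler
-- what changed: Replaces the per-call balanced-ternary digit loop (with the digit==2 adjustment branch) by a table of all 3^4 residue encodings precomputed once from plain base-3 digits, so each call is a single indexed lookup at the centred residue of balanced.
import Mathlib
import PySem

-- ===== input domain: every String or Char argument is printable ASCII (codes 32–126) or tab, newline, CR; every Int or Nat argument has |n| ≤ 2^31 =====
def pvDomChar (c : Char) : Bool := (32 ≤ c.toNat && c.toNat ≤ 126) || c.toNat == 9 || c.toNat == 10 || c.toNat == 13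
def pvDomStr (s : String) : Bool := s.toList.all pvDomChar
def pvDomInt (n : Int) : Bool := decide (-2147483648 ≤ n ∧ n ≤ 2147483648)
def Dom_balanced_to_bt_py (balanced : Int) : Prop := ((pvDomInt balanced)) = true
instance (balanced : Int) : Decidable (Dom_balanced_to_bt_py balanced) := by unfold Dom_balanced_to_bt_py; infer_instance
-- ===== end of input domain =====

-- B replaces the per-call balanced-ternary loop by a precomputed table of all 3^4 residue encodings, indexed by the centred residue of balanced (objective: simpler O(1) lookup per call).

-- ===== PORT A =====
def balanced_to_bt_py (balanced : Int) : Int × Int × Int × Int :=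
  let r := (List.range 4).foldl (fun (st : List Int × Int) _ =>
    let digit := PySem.Int.mod st.2 3
    let digit := if digit == 2 then (-1 : Int) else digit
    (st.1 ++ [digit], PySem.Int.floordiv (st.2 - digit) 3)) ([], balanced)
  match r.1 with
  | [a, b, c, d] => (a, b, c, d)
  | _ => (0, 0, 0, 0)   -- unreachable: the loop appends exactly 4 digits

-- ===== PORT B =====
def btDigits (m : Int) : Int × Int × Int × Int :=
  let d0 := PySem.Int.mod m 3 - 1
  let m1 := PySem.Int.floordiv m 3
  let d1 := PySem.Int.mod m1 3 - 1
  let m2 := PySem.Int.floordiv m1 3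
  let d2 := PySem.Int.mod m2 3 - 1
  let m3 := PySem.Int.floordiv m2 3
  let d3 := PySem.Int.mod m3 3 - 1
  (d0, d1, d2, d3)

def btTable : List (Int × Int × Int × Int) :=
  (PySem.List.pyRange 0 81 1).map btDigits

def balanced_to_bt_py_alt (balanced : Int) : Int × Int × Int × Int :=
  PySem.List.pyGetD btTable (PySem.Int.mod (balanced + 40) 81) (0, 0, 0, 0)

-- ===== PRECONDITION & SPEC =====
def Spec_balanced_to_bt_py (balanced : Int) (out : Int × Int × Int × Int) : Prop := out = balanced_to_bt_py_alt balanced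
instance (balanced : Int) (out : Int × Int × Int × Int) : Decidable (Spec_balanced_to_bt_py balanced out) := by unfold Spec_balanced_to_bt_py; infer_instance

-- ===== CLAIM (what is proved, stated in full; the proofs are below) =====
def Claim_equal_balanced_to_bt_py : Prop := ∀ (balanced : Int), Dom_balanced_to_bt_py balanced → Spec_balanced_to_bt_py balanced (balanced_to_bt_py balanced)

-- ===== LEMMAS AND PROOFS =====

-- one balanced-ternary digit and the next value of A's loop
def pvDig (v : Int) : Int := if v % 3 = 2 then -1 else v % 3
def pvNxt (v : Int) : Int := (v - pvDig v) / 3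

theorem A_norm (v : Int) :
    balanced_to_bt_py v = (pvDig v, pvDig (pvNxt v), pvDig (pvNxt (pvNxt v)), pvDig (pvNxt (pvNxt (pvNxt v)))) := by
  simp only [balanced_to_bt_py, List.range, List.range.loop, List.foldl,
    PySem.Int.mod_eq_emod_of_pos (show (0:Int) < 3 by norm_num),
    PySem.Int.floordiv_eq_ediv_of_pos (show (0:Int) < 3 by norm_num),
    pvDig, pvNxt, List.nil_append, List.cons_append, beq_iff_eq]

theorem dig_congr (v w : Int) (h : v % 3 = w % 3) : pvDig v = pvDig w := by
  simp [pvDig, h]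

theorem nxt_congr (n v w : Int) (hn : n = 27 ∨ n = 9 ∨ n = 3)
    (h : v % (3 * n) = w % (3 * n)) : pvNxt v % n = pvNxt w % n := by
  unfold pvNxt pvDig
  rcases hn with rfl | rfl | rfl <;> (norm_num at h ⊢; split_ifs <;> omega)

theorem A_congr (v w : Int) (h : v % 81 = w % 81) :
    balanced_to_bt_py v = balanced_to_bt_py w := by
  rw [A_norm, A_norm]
  have h1 : pvNxt v % 27 = pvNxt w % 27 := nxt_congr 27 v w (by norm_num) (by norm_num; omega)
  have h2 : pvNxt (pvNxt v) % 9 = pvNxt (pvNxt w) % 9 :=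
    nxt_congr 9 _ _ (by norm_num) (by norm_num; omega)
  have h3 : pvNxt (pvNxt (pvNxt v)) % 3 = pvNxt (pvNxt (pvNxt w)) % 3 :=
    nxt_congr 3 _ _ (by norm_num) (by norm_num; omega)
  have d0 : pvDig v = pvDig w := dig_congr v w (by omega)
  have d1 : pvDig (pvNxt v) = pvDig (pvNxt w) := dig_congr (pvNxt v) (pvNxt w) (by omega)
  have d2 : pvDig (pvNxt (pvNxt v)) = pvDig (pvNxt (pvNxt w)) :=
    dig_congr (pvNxt (pvNxt v)) (pvNxt (pvNxt w)) (by omega)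
  have d3 : pvDig (pvNxt (pvNxt (pvNxt v))) = pvDig (pvNxt (pvNxt (pvNxt w))) :=
    dig_congr (pvNxt (pvNxt (pvNxt v))) (pvNxt (pvNxt (pvNxt w))) h3
  rw [d0, d1, d2, d3]

theorem B_congr (v w : Int) (h : v % 81 = w % 81) :
    balanced_to_bt_py_alt v = balanced_to_bt_py_alt w := by
  unfold balanced_to_bt_py_alt
  have h81 : (0 : Int) < 81 := by norm_num
  rw [PySem.Int.mod_eq_emod_of_pos h81, PySem.Int.mod_eq_emod_of_pos h81]
  congr 1
  omega

theorem AB_small (r : Int) (h0 : 0 ≤ r) (h1 : r < 81) :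
    balanced_to_bt_py r = balanced_to_bt_py_alt r := by
  interval_cases r <;> decide

-- ===== VERDICT (by name: the statement is the Claim_ definition above) =====
theorem balanced_to_bt_py_spec : Claim_equal_balanced_to_bt_py := by
  intro balanced _
  unfold Spec_balanced_to_bt_py
  have h : balanced % 81 = (balanced % 81) % 81 := by omega
  rw [A_congr balanced (balanced % 81) h, B_congr balanced (balanced % 81) h]
  exact AB_small _ (by omega) (by omega)
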